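-- pv_equiv track=rewrite | github.com/Aasthaengg/IBMdataset | Python_codes/p02891/s793935634.py | f
-- ===== SOURCE A (Python) =====
-- def f(S):
--     res = 0
--     count = 1
--     length = len(S)
--     for i in range(1,length):
--         if S[i] == S[i-1]:
--             count += 1
--         else:
--             res += count // 2
--             count = 1
--     res += count // 2
--     return res
-- ===== SOURCE B (Python) =====
-- def f(S):
--     res = 0
--     i = 1
--     while i < len(S):
--         if S[i] == S[i-1]:
--             res += 1
--             i += 2
--         else:
--             i += 1
--     return res
-- ===== Notes on version B (the rewrite author's own statement) =====
-- stated objective: alternative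
-- what changed: B replaces the run-length counter (count per run, flushed as count//2 on each change) with a greedy single pass that pairs adjacent equal characters directly, skipping two positions per pair and never computing a division.
import Mathlib
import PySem

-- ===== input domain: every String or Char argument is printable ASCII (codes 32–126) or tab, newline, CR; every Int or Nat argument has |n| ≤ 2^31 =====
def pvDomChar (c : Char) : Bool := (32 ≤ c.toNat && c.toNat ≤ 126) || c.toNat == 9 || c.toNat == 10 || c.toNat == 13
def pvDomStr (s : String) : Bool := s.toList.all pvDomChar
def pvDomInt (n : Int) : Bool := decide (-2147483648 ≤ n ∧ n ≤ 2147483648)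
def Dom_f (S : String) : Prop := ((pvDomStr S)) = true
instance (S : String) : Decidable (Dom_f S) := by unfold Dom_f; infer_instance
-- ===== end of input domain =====

-- B pairs adjacent equal characters greedily in one pass instead of counting run lengths and flushing count//2 at each run boundary.

-- ===== PORT A =====
-- A's loop 'for i in range(1,len(S))' compares S[i] with S[i-1]; ported as the
-- structural recursion over the tail carrying the previous character and the
-- same state (res, count).
def fLoop : Char → List Char → Int → Int → Int
  | _, [], res, count => res + PySem.Int.floordiv count 2
  | prev, c :: rest, res, count =>
    if c == prev then fLoop c rest res (count + 1)
    else fLoop c rest (res + PySem.Int.floordiv count 2) 1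

def f (S : String) : Int :=
  match S.toList with
  | [] => 0 + PySem.Int.floordiv 1 2
  | c :: rest => fLoop c rest 0 1

-- ===== PORT B =====
-- B's while loop: compare S[i] with S[i-1]; on a match add 1 and skip two
-- positions, otherwise advance one. Ported as recursion on the suffix.
def gLoop : List Char → Int → Int
  | [], res => res
  | [_], res => res
  | a :: b :: rest, res => if b == a then gLoop rest (res + 1) else gLoop (b :: rest) res

def f_alt (S : String) : Int := gLoop S.toList 0

-- ===== PRECONDITION & SPEC =====
def Spec_f (S : String) (out : Int) : Prop := out = f_alt S
instance (S : String) (out : Int) : Decidable (Spec_f S out) := by unfold Spec_f; infer_instance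

-- ===== CLAIM (what is proved, stated in full; the proofs are below) =====
def Claim_equal_f : Prop := ∀ (S : String), Dom_f S → Spec_f S (f S)

-- ===== LEMMAS AND PROOFS =====

theorem fLoop_eq_gLoop (rest : List Char) :
    ∀ (c : Char) (res count : Int), 1 ≤ count →
    fLoop c rest res count =
      (if count % 2 = 1 then gLoop (c :: rest) (res + count / 2)
       else gLoop rest (res + count / 2)) := by
  induction rest with
  | nil =>
      intro c res count hc
      rw [fLoop, PySem.Int.floordiv_eq_ediv_of_pos (by omega : (0:Int) < 2)]
      split_ifs <;> simp [gLoop]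
  | cons d rest ih =>
      intro c res count hc
      by_cases hdc : d = c
      · subst hdc
        simp only [fLoop, beq_self_eq_true, if_true]
        rw [ih d res (count + 1) (by omega)]
        by_cases hpar : count % 2 = 1
        · have h2 : (count + 1) % 2 ≠ 1 := by omega
          have h3 : res + (count + 1) / 2 = res + count / 2 + 1 := by omega
          simp only [hpar, if_true, h2, if_false, h3, gLoop, beq_self_eq_true]
        · have h2 : (count + 1) % 2 = 1 := by omega
          have h3 : res + (count + 1) / 2 = res + count / 2 := by omega
          simp only [hpar, if_false, h2, if_true, h3]
      · have hbeq : (d == c) = false := by simp [hdc]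
        simp only [fLoop, hbeq]
        rw [ih d (res + PySem.Int.floordiv count 2) 1 (by omega),
            PySem.Int.floordiv_eq_ediv_of_pos (by omega : (0:Int) < 2)]
        by_cases hpar : count % 2 = 1 <;>
          simp only [hpar, if_true, if_false, gLoop, hbeq] <;> norm_num

-- ===== VERDICT (by name: the statement is the Claim_ definition above) =====
theorem f_spec : Claim_equal_f := by
  intro S _
  unfold Spec_f f f_alt
  match h : S.toList with
  | [] => decide
  | c :: rest =>
      show fLoop c rest 0 1 = gLoop (c :: rest) 0
      rw [fLoop_eq_gLoop rest c 0 1 (by omega)]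
      norm_num
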